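-- pv_equiv track=rewrite | github.com/sapoclay/enreda2 | networking/ping.py | _extraer_ttl
-- ===== SOURCE A (Python) =====
-- from typing import Optional, Tuple
--
-- def _extraer_ttl(salida: str) -> Optional[int]:
--     salida_upper = salida.upper()
--     if "TTL=" not in salida_upper:
--         return None
--     for linea in salida.splitlines():
--         linea_upper = linea.upper()
--         if "TTL=" not in linea_upper:
--             continue
--         fragmentos = linea_upper.split("TTL=")
--         if len(fragmentos) < 2:
--             continue
--         resto = fragmentos[1].strip()
--         numero = ""
--         for caracter in resto:
--             if caracter.isdigit():
--                 numero += caracter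
--             else:
--                 break
--         if numero:
--             try:
--                 return int(numero)
--             except ValueError:
--                 continue
--     return None
-- ===== SOURCE B (Python) =====
-- def _despues_de_ttl(linea):
--     """Indice tras la primera aparicion (sin distinguir mayusculas) de 'TTL='; None si no hay."""
--     for i in range(len(linea)):
--         if linea[i:i + 4].upper() == "TTL=":
--             return linea[i + 4:]
--     return None
--
--
-- def _extraer_ttl(salida):
--     for linea in salida.splitlines():
--         resto = _despues_de_ttl(linea)
--         if resto is None:
--             continue
--         i = 0
--         while i < len(resto) and resto[i].isspace():
--             i += 1
--         j = i
--         while j < len(resto) and resto[j].isdigit():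
--             j += 1
--         if j > i:
--             return int(resto[i:j])
--     return None
-- ===== Notes on version B (the rewrite author's own statement) =====
-- stated objective: alternative
-- what changed: B replaces A's per-line upper()/split("TTL=")/strip()/character-accumulation pipeline by a single positional scan per line: find the first case-insensitive "TTL=" by comparing 4-character slices, skip whitespace and take the digit run by index, with no whole-line uppercasing, no global pre-check and no intermediate fragment lists.
import Mathlib
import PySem

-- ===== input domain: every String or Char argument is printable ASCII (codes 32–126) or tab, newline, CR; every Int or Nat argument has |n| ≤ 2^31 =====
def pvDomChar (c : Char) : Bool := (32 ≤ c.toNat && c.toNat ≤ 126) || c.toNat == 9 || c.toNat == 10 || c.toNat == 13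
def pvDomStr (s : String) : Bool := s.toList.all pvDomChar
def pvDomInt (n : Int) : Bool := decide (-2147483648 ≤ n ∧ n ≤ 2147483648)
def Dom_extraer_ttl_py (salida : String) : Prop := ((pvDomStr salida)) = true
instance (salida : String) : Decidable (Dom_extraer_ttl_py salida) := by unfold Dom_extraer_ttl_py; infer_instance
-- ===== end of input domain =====

-- B replaces A's upper/split("TTL=")/strip/char-accumulation pipeline by a single positional scan
-- per line (find the first case-insensitive "TTL=", skip whitespace, take the digit run): alternative
-- decomposition, same cost.

-- ===== PORT A =====
-- "TTL=" as a list of code points (shared literal)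
def pvTTL : List Char := ['T', 'T', 'L', '=']

-- inner loop of A: `for caracter in resto: if caracter.isdigit(): numero += caracter else: break`
def pvDigitsA : List Char → List Char → List Char
  | [], numero => numero
  | c :: resto, numero =>
    if PySem.Chars.isdigit c then pvDigitsA resto (numero ++ [c]) else numero

-- outer loop of A: `for linea in salida.splitlines(): …` (lines as lists of code points)
def pvLinesA : List (List Char) → Option Int
  | [] => none
  | linea :: rest =>
    let linea_upper := PySem.Chars.upper linea
    if PySem.Chars.isIn pvTTL linea_upper = false then pvLinesA rest
    else
      let fragmentos := PySem.Chars.splitOn linea_upper pvTTL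
      if fragmentos.length < 2 then pvLinesA rest
      else
        let resto := PySem.Chars.strip (fragmentos.getD 1 [])   -- fragmentos[1] (length ≥ 2 here)
        let numero := pvDigitsA resto []
        if numero ≠ [] then
          match PySem.Int.ofChars? numero with                  -- int(numero); except ValueError: continue
          | some n => some n
          | none => pvLinesA rest
        else pvLinesA rest

def extraer_ttl_py (salida : String) : Option Int :=
  let salida_upper := PySem.Str.upper salida
  if PySem.Str.isIn "TTL=" salida_upper = false then none
  else pvLinesA (PySem.Chars.splitlines salida.toList)

-- ===== PORT B =====
-- Source B `_despues_de_ttl`: scan positions; `linea[i:i+4].upper() == "TTL="` → rest after the match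
def pvFindTTL : List Char → Option (List Char)
  | [] => none
  | c :: rest =>
    if PySem.Chars.upper (List.take 4 (c :: rest)) = pvTTL then some (List.drop 3 rest)
    else pvFindTTL rest

-- Source B per-line body: skip whitespace (first while), take the digit run (second while), int(slice)
def pvLineB (linea : List Char) : Option Int :=
  match pvFindTTL linea with
  | none => none
  | some resto =>
    let digits := (resto.dropWhile PySem.Chars.isspace).takeWhile PySem.Chars.isdigit
    if digits.isEmpty then none else PySem.Int.ofChars? digits

def extraer_ttl_py_alt (salida : String) : Option Int :=
  (PySem.Chars.splitlines salida.toList).findSome? pvLineB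

-- ===== PRECONDITION & SPEC =====
def Spec_extraer_ttl_py (salida : String) (out : Option Int) : Prop := out = extraer_ttl_py_alt salida
instance (salida : String) (out : Option Int) : Decidable (Spec_extraer_ttl_py salida out) := by unfold Spec_extraer_ttl_py; infer_instance

-- ===== CLAIM (what is proved, stated in full; the proofs are below) =====
def Claim_equal_extraer_ttl_py : Prop := ∀ (salida : String), Dom_extraer_ttl_py salida → Spec_extraer_ttl_py salida (extraer_ttl_py salida)

-- ===== LEMMAS AND PROOFS =====

theorem pvCharLe (a b : Char) : (a ≤ b) ↔ a.toNat ≤ b.toNat := by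
  rw [Char.le_def, UInt32.le_iff_toNat_le]; rfl

theorem pvUpperCharToNat (c : Char) :
    (PySem.Chars.upperChar c).toNat = if 97 ≤ c.toNat ∧ c.toNat ≤ 122 then c.toNat - 32 else c.toNat := by
  simp only [PySem.Chars.upperChar, PySem.Chars.islower, Bool.and_eq_true, decide_eq_true_eq,
    pvCharLe]
  have h97 : ('a' : Char).toNat = 97 := rfl
  have h122 : ('z' : Char).toNat = 122 := rfl
  rw [h97, h122]
  split
  · next h => rw [Char.toNat_ofNat, if_pos (Or.inl (by omega))]
  · next h => rfl

theorem pvIsdigitIff (c : Char) : PySem.Chars.isdigit c = true ↔ 48 ≤ c.toNat ∧ c.toNat ≤ 57 := by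
  simp only [PySem.Chars.isdigit, Bool.and_eq_true, decide_eq_true_eq, pvCharLe]
  exact Iff.rfl

theorem pvIsdigitUpper (c : Char) :
    PySem.Chars.isdigit (PySem.Chars.upperChar c) = PySem.Chars.isdigit c := by
  rcases Bool.eq_false_or_eq_true (PySem.Chars.isdigit c) with h | h <;> rw [h]
  · rw [pvIsdigitIff] at h
    rw [pvIsdigitIff, pvUpperCharToNat]
    split <;> omega
  · rw [Bool.eq_false_iff] at h ⊢
    simp only [ne_eq, pvIsdigitIff, pvUpperCharToNat] at h ⊢
    split <;> omega

theorem pvUpperOfDigit {c : Char} (h : PySem.Chars.isdigit c = true) :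
    PySem.Chars.upperChar c = c := by
  rw [pvIsdigitIff] at h
  simp only [PySem.Chars.upperChar, PySem.Chars.islower, Bool.and_eq_true, decide_eq_true_eq,
    pvCharLe]
  have h97 : ('a' : Char).toNat = 97 := rfl
  have h122 : ('z' : Char).toNat = 122 := rfl
  rw [h97, h122, if_neg (by omega)]

theorem pvIsspaceIff (c : Char) : PySem.Chars.isspace c = true ↔
    (c.toNat = 32 ∨ (9 ≤ c.toNat ∧ c.toNat ≤ 13) ∨ (28 ≤ c.toNat ∧ c.toNat ≤ 31) ∨ c.toNat = 133 ∨
     c.toNat = 160 ∨ c.toNat = 5760 ∨ (8192 ≤ c.toNat ∧ c.toNat ≤ 8202) ∨ c.toNat = 8232 ∨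
     c.toNat = 8233 ∨ c.toNat = 8239 ∨ c.toNat = 8287 ∨ c.toNat = 12288) := by
  simp only [PySem.Chars.isspace, Bool.or_eq_true, Bool.and_eq_true, decide_eq_true_eq]
  tauto

theorem pvIsspaceUpper (c : Char) :
    PySem.Chars.isspace (PySem.Chars.upperChar c) = PySem.Chars.isspace c := by
  rcases Bool.eq_false_or_eq_true (PySem.Chars.isspace c) with h | h <;> rw [h]
  · rw [pvIsspaceIff] at h
    rw [pvIsspaceIff, pvUpperCharToNat]
    split <;> omega
  · rw [Bool.eq_false_iff] at h ⊢
    simp only [ne_eq, pvIsspaceIff, pvUpperCharToNat] at h ⊢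
    split <;> omega

theorem pvSpaceNotDigit {c : Char} (h : PySem.Chars.isspace c = true) :
    PySem.Chars.isdigit c = false := by
  rw [pvIsspaceIff] at h
  simp only [Bool.eq_false_iff, ne_eq, pvIsdigitIff]
  omega

theorem pvDigitsA_eq (l acc : List Char) :
    pvDigitsA l acc = acc ++ l.takeWhile PySem.Chars.isdigit := by
  induction l generalizing acc with
  | nil => simp [pvDigitsA]
  | cons c rest ih =>
    simp only [pvDigitsA, List.takeWhile_cons]
    split <;> simp_all

def pySplitTTL : List Char → List (List Char)
  | [] => [[]]
  | l@(c :: rest) =>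
    if pvTTL.isPrefixOf l then [] :: pySplitTTL (l.drop 4)
    else
      match pySplitTTL rest with
      | p :: ps => (c :: p) :: ps
      | [] => [[c]]
  termination_by l => l.length
  decreasing_by
    all_goals subst_vars
    all_goals simp [List.length_drop]

theorem pySplitTTL_ne_nil (l : List Char) : pySplitTTL l ≠ [] := by
  induction l using pySplitTTL.induct with
  | case1 => simp [pySplitTTL]
  | case2 c rest hp ih => simp [pySplitTTL, hp]
  | case3 c rest hnp p ps hm ih => simp [pySplitTTL, hnp, hm]
  | case4 c rest hnp hm ih => simp [pySplitTTL, hnp, hm]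

theorem pvSplitOnGo (fuel : Nat) (l cur : List Char) (acc : List (List Char)) (h : l.length < fuel) :
    PySem.Chars.splitOn.go pvTTL fuel l cur acc
      = acc.reverse ++ (pySplitTTL l).modifyHead (cur.reverse ++ ·) := by
  induction fuel generalizing l cur acc with
  | zero => omega
  | succ fuel ih =>
    rw [PySem.Chars.splitOn.go.eq_def]
    match l with
    | [] => simp [pySplitTTL]
    | c :: rest =>
      simp only []
      split
      · next hp =>
        rw [ih _ _ _ (by simp [pvTTL] at h ⊢; omega)]
        have hd : List.drop pvTTL.length (c :: rest) = List.drop 3 rest := by simp [pvTTL]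
        rw [hd]
        have hne := pySplitTTL_ne_nil (List.drop 3 rest)
        simp only [pySplitTTL, hp, if_pos]
        cases hm : pySplitTTL (List.drop 3 rest) with
        | nil => exact absurd hm hne
        | cons p ps => simp_all [List.modifyHead]
      · next hp =>
        rw [ih _ _ _ (by simp at h ⊢; omega)]
        have hne := pySplitTTL_ne_nil rest
        simp only [pySplitTTL, hp]
        cases hm : pySplitTTL rest with
        | nil => exact absurd hm hne
        | cons p ps => simp_all [List.modifyHead]

theorem pvSplitOn_eq (l : List Char) : PySem.Chars.splitOn l pvTTL = pySplitTTL l := by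
  rw [PySem.Chars.splitOn, pvSplitOnGo _ _ _ _ (by omega)]
  cases hm : pySplitTTL l with
  | nil => exact absurd hm (pySplitTTL_ne_nil l)
  | cons p ps => simp [List.modifyHead]

theorem pySplitTTL_head (m : List Char) :
    ∃ h ps, pySplitTTL m = h :: ps ∧ (h = m ∨ ∃ t, m = h ++ pvTTL ++ t) := by
  induction m using pySplitTTL.induct with
  | case1 => exact ⟨[], [], by simp [pySplitTTL]⟩
  | case2 c rest hp ih =>
    refine ⟨[], pySplitTTL (List.drop 3 rest), by simp [pySplitTTL, hp], Or.inr ?_⟩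
    have hp' : pvTTL <+: c :: rest := by simpa [List.isPrefixOf_iff_prefix] using hp
    obtain ⟨t, ht⟩ := hp'
    exact ⟨t, by simp [← ht]⟩
  | case3 c rest hnp p ps hm ih =>
    obtain ⟨h', ps', hm', hcase⟩ := ih
    rw [hm] at hm'
    obtain ⟨rfl, rfl⟩ : p = h' ∧ ps = ps' := by simp_all
    refine ⟨c :: p, ps, by simp [pySplitTTL, hnp, hm], ?_⟩
    rcases hcase with rfl | ⟨t, rfl⟩
    · exact Or.inl rfl
    · exact Or.inr ⟨t, by simp⟩
  | case4 c rest hnp hm ih => exact absurd hm (pySplitTTL_ne_nil rest)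

theorem pvCond_iff (c : Char) (rest : List Char) :
    PySem.Chars.upper (List.take 4 (c :: rest)) = pvTTL ↔ pvTTL <+: PySem.Chars.upper (c :: rest) := by
  rw [List.prefix_iff_eq_take]
  unfold PySem.Chars.upper
  rw [← List.map_take]
  constructor <;> intro h
  · rw [show (pvTTL.length : Nat) = 4 from rfl, h]
  · rw [show (pvTTL.length : Nat) = 4 from rfl] at h
    exact h.symm

theorem pvFindTTL_none_iff (l : List Char) :
    pvFindTTL l = none ↔ ¬ pvTTL <:+: PySem.Chars.upper l := by
  induction l with
  | nil => simp [pvFindTTL, PySem.Chars.upper, pvTTL]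
  | cons c rest ih =>
    show (if PySem.Chars.upper (List.take 4 (c :: rest)) = pvTTL then some (List.drop 3 rest)
      else pvFindTTL rest) = none ↔ _
    have hu : PySem.Chars.upper (c :: rest)
        = PySem.Chars.upperChar c :: PySem.Chars.upper rest := rfl
    rw [hu, List.infix_cons_iff, ← hu]
    split
    · next hc =>
      simp only [reduceCtorEq, false_iff, not_not]
      exact Or.inl ((pvCond_iff c rest).mp hc)
    · next hc =>
      rw [ih]
      constructor
      · intro hn h
        rcases h with h | h
        · exact hc ((pvCond_iff c rest).mpr h)
        · exact hn h
      · intro hn h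
        exact hn (Or.inr h)

theorem pvFindTTL_some_split {l r : List Char} (h : pvFindTTL l = some r) :
    ∃ pre, pySplitTTL (PySem.Chars.upper l) = pre :: pySplitTTL (PySem.Chars.upper r) := by
  induction l with
  | nil => simp [pvFindTTL] at h
  | cons c rest ih =>
    rw [show pvFindTTL (c :: rest) = (if PySem.Chars.upper (List.take 4 (c :: rest)) = pvTTL
      then some (List.drop 3 rest) else pvFindTTL rest) from rfl] at h
    split at h
    · next hc =>
      obtain rfl : r = List.drop 3 rest := by injection h with h'; exact h'.symm
      have hpfx : pvTTL <+: PySem.Chars.upper (c :: rest) := (pvCond_iff c rest).mp hc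
      refine ⟨[], ?_⟩
      have hu : PySem.Chars.upper (c :: rest)
          = PySem.Chars.upperChar c :: PySem.Chars.upper rest := rfl
      rw [hu]
      rw [show pySplitTTL (PySem.Chars.upperChar c :: PySem.Chars.upper rest)
        = if pvTTL.isPrefixOf (PySem.Chars.upperChar c :: PySem.Chars.upper rest)
          then [] :: pySplitTTL ((PySem.Chars.upperChar c :: PySem.Chars.upper rest).drop 4)
          else match pySplitTTL (PySem.Chars.upper rest) with
            | p :: ps => (PySem.Chars.upperChar c :: p) :: ps
            | [] => [[PySem.Chars.upperChar c]] from by rw [pySplitTTL]]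
      rw [if_pos (by rw [List.isPrefixOf_iff_prefix]; exact hu ▸ hpfx)]
      congr 1
      show pySplitTTL (List.drop 3 (PySem.Chars.upper rest)) = _
      unfold PySem.Chars.upper
      rw [← List.map_drop]
    · next hc =>
      obtain ⟨pre, hpre⟩ := ih h
      have hnp : ¬ pvTTL <+: PySem.Chars.upper (c :: rest) := fun hx => hc ((pvCond_iff c rest).mpr hx)
      have hu : PySem.Chars.upper (c :: rest)
          = PySem.Chars.upperChar c :: PySem.Chars.upper rest := rfl
      rw [hu]
      rw [show pySplitTTL (PySem.Chars.upperChar c :: PySem.Chars.upper rest)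
        = if pvTTL.isPrefixOf (PySem.Chars.upperChar c :: PySem.Chars.upper rest)
          then [] :: pySplitTTL ((PySem.Chars.upperChar c :: PySem.Chars.upper rest).drop 4)
          else match pySplitTTL (PySem.Chars.upper rest) with
            | p :: ps => (PySem.Chars.upperChar c :: p) :: ps
            | [] => [[PySem.Chars.upperChar c]] from by rw [pySplitTTL]]
      rw [if_neg (by rw [List.isPrefixOf_iff_prefix]; exact hu ▸ hnp)]
      rw [hpre]
      exact ⟨PySem.Chars.upperChar c :: pre, rfl⟩

def pvScan (l : List Char) : List Char :=
  (l.dropWhile PySem.Chars.isspace).takeWhile PySem.Chars.isdigit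

theorem pvTakeWhileDigit_cons_stop {d : Char} (hd : PySem.Chars.isdigit d = false) (t : List Char) :
    (d :: t).takeWhile PySem.Chars.isdigit = [] := by
  simp [hd]

theorem pvScan_append_stop {d : Char} (hs : PySem.Chars.isspace d = false)
    (hd : PySem.Chars.isdigit d = false) (p t : List Char) :
    pvScan (p ++ d :: t) = pvScan p := by
  unfold pvScan
  rw [List.dropWhile_append]
  split
  · next he =>
    rw [List.dropWhile_cons_of_neg (by simp [hs]), pvTakeWhileDigit_cons_stop hd]
    rw [List.isEmpty_iff] at he
    rw [he]
    rfl
  · next he =>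
    rw [List.takeWhile_append]
    split
    · next hlen =>
      have : (p.dropWhile PySem.Chars.isspace).takeWhile PySem.Chars.isdigit
          = p.dropWhile PySem.Chars.isspace :=
        List.IsPrefix.eq_of_length (List.takeWhile_prefix _) hlen
      rw [pvTakeWhileDigit_cons_stop hd, this, List.append_nil]
    · rfl

theorem pvScan_upper (r : List Char) : pvScan (PySem.Chars.upper r) = pvScan r := by
  unfold pvScan PySem.Chars.upper
  rw [List.dropWhile_map, List.takeWhile_map]
  have h1 : (PySem.Chars.isspace ∘ PySem.Chars.upperChar) = PySem.Chars.isspace := by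
    funext c; exact pvIsspaceUpper c
  have h2 : (PySem.Chars.isdigit ∘ PySem.Chars.upperChar) = PySem.Chars.isdigit := by
    funext c; exact pvIsdigitUpper c
  rw [h1, h2]
  symm
  conv_lhs => rw [show List.takeWhile PySem.Chars.isdigit (List.dropWhile PySem.Chars.isspace r)
    = List.map id (List.takeWhile PySem.Chars.isdigit (List.dropWhile PySem.Chars.isspace r)) from (List.map_id _).symm]
  apply List.map_congr_left
  intro c hc
  exact (pvUpperOfDigit (List.mem_takeWhile_imp hc)).symm

theorem pvTakeWhile_rstrip (z : List Char) :
    (PySem.Chars.rstrip z).takeWhile PySem.Chars.isdigit = z.takeWhile PySem.Chars.isdigit := by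
  unfold PySem.Chars.rstrip
  have hz : z = (z.reverse.dropWhile PySem.Chars.isspace).reverse
      ++ (z.reverse.takeWhile PySem.Chars.isspace).reverse := by
    conv_lhs => rw [show z = z.reverse.reverse from (List.reverse_reverse z).symm,
      show z.reverse = z.reverse.takeWhile PySem.Chars.isspace ++ z.reverse.dropWhile PySem.Chars.isspace
        from (List.takeWhile_append_dropWhile).symm]
    rw [List.reverse_append]
  conv_rhs => rw [hz]
  rw [List.takeWhile_append]
  split
  · next hlen =>
    have hfull : (z.reverse.dropWhile PySem.Chars.isspace).reverse.takeWhile PySem.Chars.isdigit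
        = (z.reverse.dropWhile PySem.Chars.isspace).reverse :=
      List.IsPrefix.eq_of_length (List.takeWhile_prefix _) hlen
    rw [hfull]
    cases hw : (z.reverse.takeWhile PySem.Chars.isspace).reverse with
    | nil => simp
    | cons d t =>
      have hd : d ∈ z.reverse.takeWhile PySem.Chars.isspace := by
        have : d ∈ (z.reverse.takeWhile PySem.Chars.isspace).reverse := by rw [hw]; exact List.mem_cons_self
        simpa using this
      rw [pvTakeWhileDigit_cons_stop (pvSpaceNotDigit (List.mem_takeWhile_imp hd))]
      simp
  · rfl

theorem pvNumero_eq {l r : List Char} (hf : pvFindTTL l = some r) :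
    pvDigitsA (PySem.Chars.strip ((PySem.Chars.splitOn (PySem.Chars.upper l) pvTTL).getD 1 [])) []
      = pvScan r := by
  obtain ⟨pre, hpre⟩ := pvFindTTL_some_split hf
  obtain ⟨h, ps, hh, hcase⟩ := pySplitTTL_head (PySem.Chars.upper r)
  rw [pvSplitOn_eq, hpre, hh]
  rw [show (pre :: h :: ps).getD 1 [] = h from rfl]
  rw [pvDigitsA_eq, List.nil_append]
  rw [PySem.Chars.strip, pvTakeWhile_rstrip, PySem.Chars.lstrip]
  show pvScan h = pvScan r
  have hupper : pvScan h = pvScan (PySem.Chars.upper r) := by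
    rcases hcase with rfl | ⟨t, ht⟩
    · rfl
    · rw [ht, show h ++ pvTTL ++ t = h ++ 'T' :: (['T', 'L', '='] ++ t) from by simp [pvTTL]]
      exact (pvScan_append_stop (by decide) (by decide) h _).symm
  rw [hupper, pvScan_upper]

theorem pvLines_eq (ls : List (List Char)) : pvLinesA ls = ls.findSome? pvLineB := by
  induction ls with
  | nil => rfl
  | cons linea rest ih =>
    rw [List.findSome?_cons]
    cases hn : pvFindTTL linea with
    | none =>
      have hin : PySem.Chars.isIn pvTTL (PySem.Chars.upper linea) = false := by
        rw [PySem.Chars.isIn_eq_false_iff]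
        exact (pvFindTTL_none_iff linea).mp hn
      rw [show pvLineB linea = none from by unfold pvLineB; rw [hn]]
      simp only [pvLinesA, hin]
      simpa using ih
    | some r =>
      have hocc : pvTTL <:+: PySem.Chars.upper linea := by
        by_contra hc
        rw [← pvFindTTL_none_iff] at hc
        simp [hc] at hn
      have hin : PySem.Chars.isIn pvTTL (PySem.Chars.upper linea) = true :=
        (PySem.Chars.isIn_iff_infix _ _).mpr hocc
      obtain ⟨pre, hpre⟩ := pvFindTTL_some_split hn
      obtain ⟨h, ps, hh, _⟩ := pySplitTTL_head (PySem.Chars.upper r)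
      have hlen : ¬ (PySem.Chars.splitOn (PySem.Chars.upper linea) pvTTL).length < 2 := by
        rw [pvSplitOn_eq, hpre, hh]; simp
      have hnum := pvNumero_eq hn
      have hB : pvLineB linea = (if ((r.dropWhile PySem.Chars.isspace).takeWhile
          PySem.Chars.isdigit).isEmpty then none
          else PySem.Int.ofChars? ((r.dropWhile PySem.Chars.isspace).takeWhile PySem.Chars.isdigit)) := by
        unfold pvLineB; rw [hn]
      simp only [pvLinesA]
      rw [if_neg (by simp [hin]), if_neg hlen, hnum, hB]
      cases hscan : pvScan r with
      | nil =>
        rw [show pvScan r = (r.dropWhile PySem.Chars.isspace).takeWhile PySem.Chars.isdigit from rfl] at hscan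
        rw [hscan]
        simp only [ne_eq, not_true_eq_false, List.isEmpty_nil, if_true, if_false]
        exact ih
      | cons d t =>
        rw [show pvScan r = (r.dropWhile PySem.Chars.isspace).takeWhile PySem.Chars.isdigit from rfl] at hscan
        rw [hscan]
        simp only [ne_eq, reduceCtorEq, not_false_eq_true, if_true, List.isEmpty_cons, if_false]
        cases PySem.Int.ofChars? (d :: t) with
        | none => exact ih
        | some n => rfl

theorem pvSplitlinesGo_nil (isB : Char → Bool) (cur : List Char) (acc : List (List Char))
    (l : List Char) (hmem : l ∈ PySem.Chars.splitlines.go isB [] cur acc) :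
    l ∈ acc ∨ l <:+: (cur.reverse ++ ([] : List Char)) := by
  rw [PySem.Chars.splitlines.go.eq_1] at hmem
  split at hmem
  · exact Or.inl (by simpa using hmem)
  · rcases (by simpa using hmem : l ∈ acc ∨ l = cur.reverse) with h | rfl
    · exact Or.inl h
    · exact Or.inr ⟨[], [], by simp⟩

theorem pvSplitlinesGo_infix (isB : Char → Bool) (n : Nat) :
    ∀ (s cur : List Char) (acc : List (List Char)) (l : List Char), s.length ≤ n →
      l ∈ PySem.Chars.splitlines.go isB s cur acc → l ∈ acc ∨ l <:+: (cur.reverse ++ s) := by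
  induction n with
  | zero =>
    intro s cur acc l hlen hmem
    have hs : s = [] := List.length_eq_zero_iff.mp (Nat.le_zero.mp hlen)
    subst hs
    exact pvSplitlinesGo_nil isB cur acc l hmem
  | succ n ih =>
    intro s cur acc l hlen hmem
    rcases s with _ | ⟨c, s'⟩
    · exact pvSplitlinesGo_nil isB cur acc l hmem
    rcases s' with _ | ⟨c2, rest⟩
    · -- s = [c]
      rw [PySem.Chars.splitlines.go.eq_3 isB cur acc c []
        (by intro r _ h2; cases h2)] at hmem
      split at hmem
      · rcases pvSplitlinesGo_nil isB [] (cur.reverse :: acc) l hmem with h | h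
        · rcases List.mem_cons.mp h with rfl | h
          · exact Or.inr ⟨[], [c], by simp⟩
          · exact Or.inl h
        · simp at h
          subst h
          exact Or.inr ⟨cur.reverse ++ [c], [], by simp⟩
      · rcases pvSplitlinesGo_nil isB (c :: cur) acc l hmem with h | h
        · exact Or.inl h
        · obtain ⟨u, v, huv⟩ := h
          exact Or.inr ⟨u, v, by simpa using huv⟩
    · by_cases hcr : c = '\x0d' ∧ c2 = '\n'
      · obtain ⟨rfl, rfl⟩ := hcr
        rw [PySem.Chars.splitlines.go.eq_2] at hmem
        rcases ih rest [] (cur.reverse :: acc) l (by simp at hlen ⊢; omega) hmem with h | h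
        · rcases List.mem_cons.mp h with rfl | h
          · exact Or.inr ⟨[], '\x0d' :: '\n' :: rest, by simp⟩
          · exact Or.inl h
        · obtain ⟨u, v, huv⟩ := h
          simp only [List.reverse_nil, List.nil_append] at huv
          exact Or.inr ⟨cur.reverse ++ ['\x0d', '\n'] ++ u, v, by rw [← huv]; simp⟩
      · rw [PySem.Chars.splitlines.go.eq_3 isB cur acc c (c2 :: rest)
          (by intro r h1 h2; exact hcr ⟨h1, by cases h2; rfl⟩)] at hmem
        split at hmem
        · rcases ih (c2 :: rest) [] (cur.reverse :: acc) l (by simp at hlen ⊢; omega) hmem with h | h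
          · rcases List.mem_cons.mp h with rfl | h
            · exact Or.inr ⟨[], c :: c2 :: rest, by simp⟩
            · exact Or.inl h
          · obtain ⟨u, v, huv⟩ := h
            simp only [List.reverse_nil, List.nil_append] at huv
            exact Or.inr ⟨cur.reverse ++ [c] ++ u, v, by rw [← huv]; simp⟩
        · rcases ih (c2 :: rest) (c :: cur) acc l (by simp at hlen ⊢; omega) hmem with h | h
          · exact Or.inl h
          · obtain ⟨u, v, huv⟩ := h
            exact Or.inr ⟨u, v, by simpa using huv⟩

theorem pvSplitlines_infix {cs l : List Char} (h : l ∈ PySem.Chars.splitlines cs) : l <:+: cs := by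
  rw [PySem.Chars.splitlines] at h
  rcases pvSplitlinesGo_infix _ cs.length cs [] [] l le_rfl h with h | h
  · simp at h
  · simpa using h

-- ===== VERDICT (by name: the statement is the Claim_ definition above) =====
theorem extraer_ttl_py_spec : Claim_equal_extraer_ttl_py := by
  intro salida _
  unfold Spec_extraer_ttl_py extraer_ttl_py extraer_ttl_py_alt
  simp only []
  split
  · next hno =>
    -- "TTL=" does not occur anywhere: B finds nothing on any line either
    symm
    rw [List.findSome?_eq_none_iff]
    intro l hl
    unfold pvLineB
    cases hfind : pvFindTTL l with
    | none => rfl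
    | some r =>
      exfalso
      have hocc : pvTTL <:+: PySem.Chars.upper l := by
        by_contra hc
        rw [← pvFindTTL_none_iff] at hc
        simp [hc] at hfind
      have hinf : l <:+: salida.toList := pvSplitlines_infix hl
      have : pvTTL <:+: PySem.Chars.upper salida.toList := by
        exact hocc.trans (by simpa [PySem.Chars.upper] using hinf.map PySem.Chars.upperChar)
      rw [PySem.Str.isIn, Bool.eq_false_iff] at hno
      exact hno (by
        rw [PySem.Chars.isIn_iff_infix]
        simpa [PySem.Str.upper, PySem.Chars.upper] using this)
  · exact pvLines_eq _
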